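-- pv_equiv track=rewrite | github.com/jwfing/myknowledge | backend/src/rememberit/extraction/pipeline.py | _trim_code_blocks
-- ===== SOURCE A (Python) =====
-- def _trim_code_blocks(text: str, max_lines: int = 20) -> str:
--     """Truncate long code blocks to reduce token usage while keeping context."""
--     result = []
--     in_code = False
--     code_lines = []
--     for line in text.split("\n"):
--         if line.strip().startswith("```") and not in_code:
--             in_code = True
--             code_lines = [line]
--         elif line.strip().startswith("```") and in_code:
--             code_lines.append(line)
--             if len(code_lines) > max_lines + 2:
--                 # Keep first and last lines of the code block
--                 trimmed = code_lines[:max_lines // 2 + 1]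
--                 trimmed.append(f"    ... ({len(code_lines) - max_lines} lines omitted) ...")
--                 trimmed.extend(code_lines[-(max_lines // 2):])
--                 result.extend(trimmed)
--             else:
--                 result.extend(code_lines)
--             in_code = False
--             code_lines = []
--         elif in_code:
--             code_lines.append(line)
--         else:
--             result.append(line)
--     # Handle unclosed code blocks
--     if code_lines:
--         result.extend(code_lines[:max_lines])
--     return "\n".join(result)
-- ===== SOURCE B (Python) =====
-- def _fence(line):
--     return line.strip().startswith("```")
--
--
-- def _trim_block(block, max_lines):
--     if len(block) > max_lines + 2:
--         return (block[:max_lines // 2 + 1]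
--                 + [f"    ... ({len(block) - max_lines} lines omitted) ..."]
--                 + block[-(max_lines // 2):])
--     return block
--
--
-- def _trim_code_blocks(text: str, max_lines: int = 20) -> str:
--     lines = text.split("\n")
--     n = len(lines)
--     out = []
--     i = 0
--     while i < n:
--         j = i
--         while j < n and not _fence(lines[j]):
--             j += 1
--         out += lines[i:j]
--         if j == n:
--             break
--         k = j + 1
--         while k < n and not _fence(lines[k]):
--             k += 1
--         if k == n:
--             out += lines[j:][:max_lines]  # unclosed block
--             break
--         out += _trim_block(lines[j:k + 1], max_lines)
--         i = k + 1
--     return "\n".join(out)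
-- ===== Notes on version B (the rewrite author's own statement) =====
-- stated objective: alternative
-- what changed: Replaced A's single-pass in_code/code_lines state machine by a fence-to-fence scanner that repeatedly splits the line list at the next fence pair, emits the text between blocks verbatim and applies the trim rule to each delimited block as a whole slice.
import Mathlib
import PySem

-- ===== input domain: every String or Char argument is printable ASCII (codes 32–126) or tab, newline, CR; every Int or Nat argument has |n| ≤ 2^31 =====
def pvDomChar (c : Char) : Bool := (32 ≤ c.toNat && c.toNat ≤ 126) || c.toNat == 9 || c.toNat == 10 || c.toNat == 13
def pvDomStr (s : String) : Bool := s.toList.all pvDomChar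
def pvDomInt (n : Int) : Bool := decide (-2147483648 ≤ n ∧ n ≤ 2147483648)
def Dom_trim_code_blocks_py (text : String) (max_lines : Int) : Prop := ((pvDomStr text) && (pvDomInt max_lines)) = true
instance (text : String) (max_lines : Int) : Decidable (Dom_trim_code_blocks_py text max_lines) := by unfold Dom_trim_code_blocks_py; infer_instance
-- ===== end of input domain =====

-- B replaces A's in_code state machine by a fence-to-fence scanner over the line list; alternative decomposition, same cost.

-- shared by both ports: the literal Python test `line.strip().startswith("```")`
def pvFence (line : String) : Bool :=
  PySem.Str.startswith (PySem.Str.strip line) "```"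

-- ===== PORT A =====
-- state = (result, in_code, code_lines); one step of A's for-loop, branches in Python order
def pvStepA (max_lines : Int) (st : List String × Bool × List String) (line : String) :
    List String × Bool × List String :=
  if pvFence line && !st.2.1 then
    (st.1, true, [line])
  else if pvFence line && st.2.1 then
    let code := st.2.2 ++ [line]
    if (code.length : Int) > max_lines + 2 then
      (st.1 ++ (PySem.List.slice code none (some (PySem.Int.floordiv max_lines 2 + 1))
        ++ ["    ... (" ++ PySem.Int.toStr ((code.length : Int) - max_lines) ++ " lines omitted) ..."]
        ++ PySem.List.slice code (some (-(PySem.Int.floordiv max_lines 2))) none), false, [])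
    else
      (st.1 ++ code, false, [])
  else if st.2.1 then
    (st.1, true, st.2.2 ++ [line])
  else
    (st.1 ++ [line], false, st.2.2)

def trim_code_blocks_py (text : String) (max_lines : Int) : String :=
  let st := ((PySem.Str.split? text "\n").getD []).foldl (pvStepA max_lines) ([], false, [])
  -- `if code_lines: result.extend(code_lines[:max_lines])`
  let result := if st.2.2 ≠ [] then st.1 ++ PySem.List.slice st.2.2 none (some max_lines) else st.1
  PySem.Str.join "\n" result

-- ===== PORT B =====
-- B's helper _trim_block
def pvTrimBlock (max_lines : Int) (block : List String) : List String :=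
  if (block.length : Int) > max_lines + 2 then
    PySem.List.slice block none (some (PySem.Int.floordiv max_lines 2 + 1))
      ++ ["    ... (" ++ PySem.Int.toStr ((block.length : Int) - max_lines) ++ " lines omitted) ..."]
      ++ PySem.List.slice block (some (-(PySem.Int.floordiv max_lines 2))) none
  else block

-- B's outer loop: emit lines up to the next fence, then handle the block starting there
def pvGoB (max_lines : Int) (ls : List String) : List String :=
  let pre := ls.takeWhile (fun l => !pvFence l)
  match h : ls.dropWhile (fun l => !pvFence l) with
  | [] => pre
  | f :: rest =>
    let body := rest.takeWhile (fun l => !pvFence l)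
    match h2 : rest.dropWhile (fun l => !pvFence l) with
    | [] => pre ++ PySem.List.slice (f :: body) none (some max_lines)  -- unclosed block
    | g :: rest2 =>
      pre ++ pvTrimBlock max_lines (f :: (body ++ [g])) ++ pvGoB max_lines rest2
termination_by ls.length
decreasing_by
  have h1 := List.length_dropWhile_le (fun l => !pvFence l) ls
  have h2' := List.length_dropWhile_le (fun l => !pvFence l) rest
  rw [h] at h1
  rw [h2] at h2'
  simp at h1 h2'
  omega

def trim_code_blocks_py_alt (text : String) (max_lines : Int) : String :=
  PySem.Str.join "\n" (pvGoB max_lines ((PySem.Str.split? text "\n").getD []))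

-- ===== PRECONDITION & SPEC =====
def Spec_trim_code_blocks_py (text : String) (max_lines : Int) (out : String) : Prop := out = trim_code_blocks_py_alt text max_lines
instance (text : String) (max_lines : Int) (out : String) : Decidable (Spec_trim_code_blocks_py text max_lines out) := by unfold Spec_trim_code_blocks_py; infer_instance

-- ===== CLAIM (what is proved, stated in full; the proofs are below) =====
def Claim_equal_trim_code_blocks_py : Prop := ∀ (text : String) (max_lines : Int), Dom_trim_code_blocks_py text max_lines → Spec_trim_code_blocks_py text max_lines (trim_code_blocks_py text max_lines)

-- ===== LEMMAS AND PROOFS =====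

-- A's finalization of a loop state (the `if code_lines:` epilogue), made unconditional
def pvFinA (max_lines : Int) (st : List String × Bool × List String) : List String :=
  st.1 ++ PySem.List.slice st.2.2 none (some max_lines)

lemma pvFinA_eq (max_lines : Int) (st : List String × Bool × List String) :
    (if st.2.2 ≠ [] then st.1 ++ PySem.List.slice st.2.2 none (some max_lines) else st.1) =
      pvFinA max_lines st := by
  unfold pvFinA
  by_cases h : st.2.2 = [] <;> simp [h, PySem.List.slice]

-- what the rest of A's loop yields once a block has been opened with accumulated `code`
def pvInCode (max_lines : Int) (code : List String) (ls : List String) : List String :=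
  let body := ls.takeWhile (fun l => !pvFence l)
  match ls.dropWhile (fun l => !pvFence l) with
  | [] => PySem.List.slice (code ++ body) none (some max_lines)
  | g :: rest2 => pvTrimBlock max_lines (code ++ body ++ [g]) ++ pvGoB max_lines rest2

-- characterizations of one pvGoB step, by the shape of the fence search
lemma pvGoB_no_fence (max_lines : Int) (ls : List String)
    (h : ls.dropWhile (fun l => !pvFence l) = []) :
    pvGoB max_lines ls = ls.takeWhile (fun l => !pvFence l) := by
  rw [pvGoB]
  split
  · rfl
  · next f rest heq => rw [h] at heq; cases heq

lemma pvGoB_unclosed (max_lines : Int) (ls f rest : _)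
    (h : ls.dropWhile (fun l => !pvFence l) = f :: rest)
    (h2 : rest.dropWhile (fun l => !pvFence l) = []) :
    pvGoB max_lines ls = ls.takeWhile (fun l => !pvFence l) ++
      PySem.List.slice (f :: rest.takeWhile (fun l => !pvFence l)) none (some max_lines) := by
  rw [pvGoB]
  split
  · next heq => rw [h] at heq; cases heq
  · next f' rest' heq =>
    rw [h] at heq
    injection heq with e1 e2; subst e1; subst e2
    split
    · rfl
    · next g rest2 heq2 => rw [h2] at heq2; cases heq2

lemma pvGoB_closed (max_lines : Int) (ls : List String) (f : String) (rest : List String)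
    (g : String) (rest2 : List String)
    (h : ls.dropWhile (fun l => !pvFence l) = f :: rest)
    (h2 : rest.dropWhile (fun l => !pvFence l) = g :: rest2) :
    pvGoB max_lines ls = ls.takeWhile (fun l => !pvFence l) ++
      pvTrimBlock max_lines (f :: (rest.takeWhile (fun l => !pvFence l) ++ [g])) ++
      pvGoB max_lines rest2 := by
  rw [pvGoB]
  split
  · next heq => rw [h] at heq; cases heq
  · next f' rest' heq =>
    rw [h] at heq
    injection heq with e1 e2; subst e1; subst e2
    split
    · next heq2 => rw [h2] at heq2; cases heq2
    · next g' rest2' heq2 =>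
      rw [h2] at heq2
      injection heq2 with e1 e2; subst e1; subst e2
      simp

lemma pvGoB_cons_fence (max_lines : Int) (l : String) (ls : List String) (h : pvFence l = true) :
    pvGoB max_lines (l :: ls) = pvInCode max_lines [l] ls := by
  have hd : List.dropWhile (fun l => !pvFence l) (l :: ls) = l :: ls :=
    List.dropWhile_cons_of_neg (by simp [h])
  have ht : List.takeWhile (fun l => !pvFence l) (l :: ls) = [] :=
    List.takeWhile_cons_of_neg (by simp [h])
  unfold pvInCode
  cases h2 : ls.dropWhile (fun l => !pvFence l) with
  | nil => rw [pvGoB_unclosed max_lines (l :: ls) l ls hd h2, ht]; simp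
  | cons g rest2 => rw [pvGoB_closed max_lines (l :: ls) l ls g rest2 hd h2, ht]; simp

lemma pvGoB_cons_nofence (max_lines : Int) (l : String) (ls : List String) (h : pvFence l = false) :
    pvGoB max_lines (l :: ls) = l :: pvGoB max_lines ls := by
  have hd : List.dropWhile (fun l => !pvFence l) (l :: ls) =
      List.dropWhile (fun l => !pvFence l) ls := List.dropWhile_cons_of_pos (by simp [h])
  have ht : List.takeWhile (fun l => !pvFence l) (l :: ls) =
      l :: List.takeWhile (fun l => !pvFence l) ls := List.takeWhile_cons_of_pos (by simp [h])
  cases h1 : ls.dropWhile (fun l => !pvFence l) with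
  | nil => rw [pvGoB_no_fence max_lines (l :: ls) (hd.trans h1), pvGoB_no_fence max_lines ls h1, ht]
  | cons f rest =>
    cases h2 : rest.dropWhile (fun l => !pvFence l) with
    | nil =>
      rw [pvGoB_unclosed max_lines (l :: ls) f rest (hd.trans h1) h2,
        pvGoB_unclosed max_lines ls f rest h1 h2, ht]
      simp
    | cons g rest2 =>
      rw [pvGoB_closed max_lines (l :: ls) f rest g rest2 (hd.trans h1) h2,
        pvGoB_closed max_lines ls f rest g rest2 h1 h2, ht]
      simp

lemma pvInCode_cons_fence (max_lines : Int) (code : List String) (l : String) (ls : List String)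
    (h : pvFence l = true) :
    pvInCode max_lines code (l :: ls) =
      pvTrimBlock max_lines (code ++ [l]) ++ pvGoB max_lines ls := by
  unfold pvInCode
  rw [List.takeWhile_cons_of_neg (by simp [h]), List.dropWhile_cons_of_neg (by simp [h])]
  simp

lemma pvInCode_cons_nofence (max_lines : Int) (code : List String) (l : String) (ls : List String)
    (h : pvFence l = false) :
    pvInCode max_lines code (l :: ls) = pvInCode max_lines (code ++ [l]) ls := by
  unfold pvInCode
  rw [List.takeWhile_cons_of_pos (by simp [h]), List.dropWhile_cons_of_pos (by simp [h])]
  cases h2 : ls.dropWhile (fun l => !pvFence l) with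
  | nil => simp
  | cons g rest2 => simp

-- the main loop invariant: A's fold, finalized, equals B's scanner
lemma pvMain (max_lines : Int) (ls : List String) :
    (∀ res : List String,
      pvFinA max_lines (ls.foldl (pvStepA max_lines) (res, false, [])) = res ++ pvGoB max_lines ls)
    ∧ (∀ res code : List String,
      pvFinA max_lines (ls.foldl (pvStepA max_lines) (res, true, code)) =
        res ++ pvInCode max_lines code ls) := by
  induction ls with
  | nil =>
    constructor
    · intro res
      rw [pvGoB]
      simp [pvFinA, PySem.List.slice]
    · intro res code
      simp [pvFinA, pvInCode]
  | cons l ls ih =>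
    constructor
    · intro res
      cases hF : pvFence l with
      | true =>
        have hstep : pvStepA max_lines (res, false, []) l = (res, true, [l]) := by
          simp [pvStepA, hF]
        rw [List.foldl_cons, hstep, (ih.2 res [l]), pvGoB_cons_fence max_lines l ls hF]
      | false =>
        have hstep : pvStepA max_lines (res, false, []) l = (res ++ [l], false, []) := by
          simp [pvStepA, hF]
        rw [List.foldl_cons, hstep, (ih.1 (res ++ [l])), pvGoB_cons_nofence max_lines l ls hF]
        simp
    · intro res code
      cases hF : pvFence l with
      | true =>
        have hstep : pvStepA max_lines (res, true, code) l =
            (res ++ pvTrimBlock max_lines (code ++ [l]), false, []) := by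
          simp [pvStepA, pvTrimBlock, hF]
          split <;> rfl
        rw [List.foldl_cons, hstep, ih.1, pvInCode_cons_fence max_lines code l ls hF]
        simp
      | false =>
        have hstep : pvStepA max_lines (res, true, code) l = (res, true, code ++ [l]) := by
          simp [pvStepA, hF]
        rw [List.foldl_cons, hstep, ih.2, pvInCode_cons_nofence max_lines code l ls hF]

-- ===== VERDICT (by name: the statement is the Claim_ definition above) =====
theorem trim_code_blocks_py_spec : Claim_equal_trim_code_blocks_py := by
  intro text max_lines _
  unfold Spec_trim_code_blocks_py
  simp only [trim_code_blocks_py, trim_code_blocks_py_alt]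
  rw [pvFinA_eq, (pvMain max_lines _).1 []]
  simp
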